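-- pv_equiv track=rewrite | github.com/akm7289/CTRNN | Blind75Problems/stricklyIncreased.py | checkIncreasingSkipIndex
-- ===== SOURCE A (Python) =====
-- def checkIncreasingSkipIndex(sequence,skipIndex):
--     for i in range(0,len(sequence)-1):
--         if i==skipIndex:
--             if i-1>=0 and i+1<len(sequence):
--                 if sequence[i-1]>=sequence[i+1]:
--                     return False
--                 else:
--                     continue
--             else:
--                 continue
--         if i+1==skipIndex:
--             if i+2<len(sequence):
--                 if sequence[i]>=sequence[i+2]:
--                     return False
--                 else:
--                     continue
--             else:
--                 continue
--
--         if sequence[i]>=sequence[i+1]: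
--             return False
--     return True
-- ===== SOURCE B (Python) =====
-- def checkIncreasingSkipIndex(sequence, skipIndex):
--     filtered = [x for j, x in enumerate(sequence) if j != skipIndex]
--     return all(a < b for a, b in zip(filtered, filtered[1:]))
-- ===== Notes on version B (the rewrite author's own statement) =====
-- stated objective: idiomatic
-- what changed: Replaces the fused skip-aware single pass with its four bridging branches by a plain build-then-scan: filter out the skipped index with enumerate, then check all adjacent pairs of the filtered list.
import Mathlib
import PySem

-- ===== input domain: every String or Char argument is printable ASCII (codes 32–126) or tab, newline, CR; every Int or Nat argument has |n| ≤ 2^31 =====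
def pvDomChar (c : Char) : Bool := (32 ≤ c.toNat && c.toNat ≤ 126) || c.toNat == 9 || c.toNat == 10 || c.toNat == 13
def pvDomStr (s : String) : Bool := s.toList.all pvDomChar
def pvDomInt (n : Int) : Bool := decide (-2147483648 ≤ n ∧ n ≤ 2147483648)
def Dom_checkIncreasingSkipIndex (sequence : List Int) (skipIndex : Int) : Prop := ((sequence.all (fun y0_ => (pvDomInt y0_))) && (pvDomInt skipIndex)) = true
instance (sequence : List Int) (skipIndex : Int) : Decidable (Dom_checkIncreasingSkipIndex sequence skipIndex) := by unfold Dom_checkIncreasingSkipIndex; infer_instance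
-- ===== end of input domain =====

-- B replaces A's fused skip-aware pass (with its i-1/i+1 bridging branches) by a plain
-- build-then-scan decomposition: filter out the skipped index, then check adjacent pairs (idiomatic).

-- ===== PORT A =====
-- the for-loop with early 'return False' over range(0, len-1)
def pvALoop (sequence : List Int) (skipIndex : Int) : List Int → Bool
  | [] => true
  | i :: rest =>
      if i = skipIndex then
        if i - 1 ≥ 0 ∧ i + 1 < (sequence.length : Int) then
          if PySem.List.pyGetD sequence (i - 1) 0 ≥ PySem.List.pyGetD sequence (i + 1) 0 then false
          else pvALoop sequence skipIndex rest
        else pvALoop sequence skipIndex rest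
      else if i + 1 = skipIndex then
        if i + 2 < (sequence.length : Int) then
          if PySem.List.pyGetD sequence i 0 ≥ PySem.List.pyGetD sequence (i + 2) 0 then false
          else pvALoop sequence skipIndex rest
        else pvALoop sequence skipIndex rest
      else if PySem.List.pyGetD sequence i 0 ≥ PySem.List.pyGetD sequence (i + 1) 0 then false
      else pvALoop sequence skipIndex rest

def checkIncreasingSkipIndex (sequence : List Int) (skipIndex : Int) : Bool :=
  pvALoop sequence skipIndex (PySem.List.pyRange 0 ((sequence.length : Int) - 1))

-- ===== PORT B =====
def checkIncreasingSkipIndex_alt (sequence : List Int) (skipIndex : Int) : Bool :=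
  let filtered := ((PySem.List.enumerate sequence).filter (fun p => p.1 != skipIndex)).map (·.2)
  (filtered.zip (PySem.List.slice filtered (some 1) none)).all (fun p => decide (p.1 < p.2))

-- ===== PRECONDITION & SPEC =====
def Spec_checkIncreasingSkipIndex (sequence : List Int) (skipIndex : Int) (out : Bool) : Prop := out = checkIncreasingSkipIndex_alt sequence skipIndex
instance (sequence : List Int) (skipIndex : Int) (out : Bool) : Decidable (Spec_checkIncreasingSkipIndex sequence skipIndex out) := by unfold Spec_checkIncreasingSkipIndex; infer_instance

-- ===== CLAIM (what is proved, stated in full; the proofs are below) =====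
def Claim_equal_checkIncreasingSkipIndex : Prop := ∀ (sequence : List Int) (skipIndex : Int), Dom_checkIncreasingSkipIndex sequence skipIndex → Spec_checkIncreasingSkipIndex sequence skipIndex (checkIncreasingSkipIndex sequence skipIndex)

-- ===== LEMMAS AND PROOFS =====

-- the per-index check of A's loop body, with the early return folded away
def pvCheck (s : List Int) (k i : Int) : Bool :=
  if i = k then
    (if i - 1 ≥ 0 ∧ i + 1 < (s.length : Int) then
      decide (PySem.List.pyGetD s (i - 1) 0 < PySem.List.pyGetD s (i + 1) 0) else true)
  else if i + 1 = k then
    (if i + 2 < (s.length : Int) then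
      decide (PySem.List.pyGetD s i 0 < PySem.List.pyGetD s (i + 2) 0) else true)
  else decide (PySem.List.pyGetD s i 0 < PySem.List.pyGetD s (i + 1) 0)

theorem pvALoop_eq_all (s : List Int) (k : Int) (l : List Int) :
    pvALoop s k l = l.all (pvCheck s k) := by
  induction l with
  | nil => rfl
  | cons i rest ih =>
      simp only [pvALoop, List.all_cons, pvCheck]
      split_ifs <;> simp_all

theorem pvA_iff (s : List Int) (k : Int) :
    checkIncreasingSkipIndex s k = true ↔
      ∀ i : Int, 0 ≤ i → i < (s.length : Int) - 1 → pvCheck s k i = true := by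
  rw [checkIncreasingSkipIndex, pvALoop_eq_all, List.all_eq_true]
  constructor
  · intro h i h0 h1; exact h i (PySem.List.mem_pyRange_one.2 ⟨h0, by omega⟩)
  · intro h i hi; obtain ⟨h0, h1⟩ := PySem.List.mem_pyRange_one.1 hi; exact h i h0 (by omega)

theorem pvFilt_aux (s : List Int) : ∀ st k : Int,
    ((PySem.List.enumerate s st).filter (fun p => p.1 != k)).map (·.2) =
      if st ≤ k ∧ k < st + (s.length : Int) then s.eraseIdx (k - st).toNat else s := by
  induction s with
  | nil => intro st k; simp [PySem.List.enumerate]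
  | cons x xs ih =>
      intro st k
      rw [PySem.List.enumerate_cons, List.filter_cons]
      by_cases hst : st = k
      · subst hst
        have : ((st : Int) != st) = false := by simp
        rw [this]
        simp only [Bool.false_eq_true, if_false]
        rw [ih (st + 1) st]
        have hcond : ¬ (st + 1 ≤ st ∧ st < st + 1 + (xs.length : Int)) := by omega
        rw [if_neg hcond]
        have : (st ≤ st ∧ st < st + ((x :: xs).length : Int)) := by simp only [List.length_cons]; push_cast; omega
        rw [if_pos this]
        simp
      · have : ((st : Int) != k) = true := by simpa using hst
        rw [this]
        simp only [if_true, List.map_cons]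
        rw [ih (st + 1) k]
        by_cases hc : st + 1 ≤ k ∧ k < st + 1 + (xs.length : Int)
        · rw [if_pos hc]
          have hc2 : st ≤ k ∧ k < st + ((x :: xs).length : Int) := by
            simp only [List.length_cons]; push_cast; omega
          rw [if_pos hc2]
          have hkst : (k - st).toNat = (k - (st + 1)).toNat + 1 := by omega
          rw [hkst, List.eraseIdx_cons_succ]
        · rw [if_neg hc]
          have hc2 : ¬ (st ≤ k ∧ k < st + ((x :: xs).length : Int)) := by
            simp only [List.length_cons]; push_cast; omega
          rw [if_neg hc2]

theorem pvFilt (s : List Int) (k : Int) :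
    ((PySem.List.enumerate s).filter (fun p => p.1 != k)).map (·.2) =
      if 0 ≤ k ∧ k < (s.length : Int) then s.eraseIdx k.toNat else s := by
  have := pvFilt_aux s 0 k
  simpa using this

theorem pvB_iff (f : List Int) :
    ((f.zip (PySem.List.slice f (some 1) none)).all (fun p => decide (p.1 < p.2)) = true) ↔
      ∀ j : Nat, j + 1 < f.length → f.getD j 0 < f.getD (j + 1) 0 := by
  rw [PySem.List.slice_from_one, List.all_eq_true]
  constructor
  · intro h j hj
    have hm : (f[j]'(by omega), f.tail[j]'(by simp [List.length_tail]; omega)) ∈ f.zip f.tail := by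
      rw [List.mem_iff_getElem]
      refine ⟨j, by simp [List.length_zip, List.length_tail]; omega, by simp [List.getElem_zip]⟩
    have h2 := h _ hm
    simp only [decide_eq_true_eq] at h2
    rw [List.getD_eq_getElem _ _ (by omega), List.getD_eq_getElem _ _ (by omega)]
    simpa [List.getElem_tail] using h2
  · intro h p hp
    obtain ⟨i, hi, rfl⟩ := List.mem_iff_getElem.1 hp
    simp only [List.length_zip, List.length_tail, lt_min_iff] at hi
    have hi1 : i + 1 < f.length := by omega
    have := h i hi1
    rw [List.getD_eq_getElem _ _ (by omega), List.getD_eq_getElem _ _ (by omega)] at this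
    simpa [List.getElem_zip, List.getElem_tail] using this

theorem pvGetD_int (s : List Int) (i : Int) (h : 0 ≤ i) :
    PySem.List.pyGetD s i 0 = s.getD i.toNat 0 := by
  rw [← PySem.List.pyGetD_natCast s i.toNat 0]
  congr 1
  omega

theorem pvGetD_eraseIdx (s : List Int) (kn j : Nat) (hj : j < s.length - 1) (hk : kn < s.length) :
    (s.eraseIdx kn).getD j 0 = if j < kn then s.getD j 0 else s.getD (j + 1) 0 := by
  have h1 : j < (s.eraseIdx kn).length := by rw [List.length_eraseIdx, if_pos hk]; omega
  rw [List.getD_eq_getElem _ _ h1, List.getElem_eraseIdx]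
  split
  · rw [List.getD_eq_getElem _ _ (by omega)]
  · rw [List.getD_eq_getElem _ _ (by omega)]

theorem pvMain (s : List Int) (k : Int) :
    checkIncreasingSkipIndex s k = checkIncreasingSkipIndex_alt s k := by
  rw [Bool.eq_iff_iff, pvA_iff]
  unfold checkIncreasingSkipIndex_alt
  rw [pvB_iff, pvFilt]
  by_cases hk : 0 ≤ k ∧ k < (s.length : Int)
  · rw [if_pos hk]
    have hkn : k.toNat < s.length := by omega
    have hkk : ((k.toNat : Nat) : Int) = k := by omega
    have hlen : (s.eraseIdx k.toNat).length = s.length - 1 := by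
      simp [List.length_eraseIdx, hkn]
    constructor
    · intro hA j hj
      rw [hlen] at hj
      rw [pvGetD_eraseIdx s k.toNat j (by omega) hkn,
          pvGetD_eraseIdx s k.toNat (j + 1) (by omega) hkn]
      by_cases h1 : j + 1 < k.toNat
      · rw [if_pos (by omega), if_pos h1]
        have := hA (j : Int) (by omega) (by omega)
        rw [pvCheck, if_neg (by omega), if_neg (by omega)] at this
        simp only [decide_eq_true_eq] at this
        rwa [pvGetD_int _ _ (by omega), pvGetD_int _ _ (by omega),
             Int.toNat_natCast, show ((j : Int) + 1).toNat = j + 1 by omega] at this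
      · by_cases h2 : j + 1 = k.toNat
        · rw [if_pos (by omega), if_neg (by omega)]
          have := hA ((j : Int)) (by omega) (by omega)
          rw [pvCheck, if_neg (by omega), if_pos (by omega), if_pos (by omega)] at this
          simp only [decide_eq_true_eq] at this
          rwa [pvGetD_int _ _ (by omega), pvGetD_int _ _ (by omega),
               Int.toNat_natCast, show ((j : Int) + 2).toNat = j + 1 + 1 by omega] at this
        · rw [if_neg (by omega), if_neg (by omega)]
          have := hA ((j : Int) + 1) (by omega) (by omega)
          rw [pvCheck, if_neg (by omega), if_neg (by omega)] at this
          simp only [decide_eq_true_eq] at this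
          rwa [pvGetD_int _ _ (by omega), pvGetD_int _ _ (by omega),
               show ((j : Int) + 1).toNat = j + 1 by omega,
               show ((j : Int) + 1 + 1).toNat = j + 1 + 1 by omega] at this
    · intro hB i h0 h1
      rw [pvCheck]
      split_ifs with c1 c2 c3 c4
      · -- i = k, bridge in range
        have := hB (k.toNat - 1) (by rw [hlen]; omega)
        rw [pvGetD_eraseIdx s k.toNat _ (by omega) hkn,
            pvGetD_eraseIdx s k.toNat _ (by omega) hkn,
            if_pos (by omega), if_neg (by omega)] at this
        simp only [decide_eq_true_eq]
        rw [pvGetD_int _ _ (by omega), pvGetD_int _ _ (by omega),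
            show (i - 1).toNat = k.toNat - 1 by omega,
            show (i + 1).toNat = k.toNat - 1 + 1 + 1 by omega]
        exact this
      · rfl
      · -- i + 1 = k, bridge in range
        have := hB i.toNat (by rw [hlen]; omega)
        rw [pvGetD_eraseIdx s k.toNat _ (by omega) hkn,
            pvGetD_eraseIdx s k.toNat _ (by omega) hkn,
            if_pos (by omega), if_neg (by omega)] at this
        simp only [decide_eq_true_eq]
        rw [pvGetD_int _ _ (by omega), pvGetD_int _ _ (by omega),
            show (i + 2).toNat = i.toNat + 1 + 1 by omega]
        exact this
      · rfl
      · -- plain adjacent pair, i ≠ k and i + 1 ≠ k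
        simp only [decide_eq_true_eq]
        rw [pvGetD_int _ _ (by omega), pvGetD_int _ _ (by omega),
            show (i + 1).toNat = i.toNat + 1 by omega]
        by_cases hlt : i.toNat < k.toNat
        · have := hB i.toNat (by rw [hlen]; omega)
          rwa [pvGetD_eraseIdx s k.toNat _ (by omega) hkn,
               pvGetD_eraseIdx s k.toNat _ (by omega) hkn,
               if_pos (by omega), if_pos (by omega)] at this
        · have := hB (i.toNat - 1) (by rw [hlen]; omega)
          rwa [pvGetD_eraseIdx s k.toNat _ (by omega) hkn,
               pvGetD_eraseIdx s k.toNat _ (by omega) hkn,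
               if_neg (by omega), if_neg (by omega),
               show i.toNat - 1 + 1 = i.toNat by omega] at this
  · rw [if_neg hk]
    constructor
    · intro hA j hj
      have := hA (j : Int) (by omega) (by omega)
      rw [pvCheck, if_neg (by omega), if_neg (by omega)] at this
      simp only [decide_eq_true_eq] at this
      rwa [pvGetD_int _ _ (by omega), pvGetD_int _ _ (by omega),
           Int.toNat_natCast, show ((j : Int) + 1).toNat = j + 1 by omega] at this
    · intro hB i h0 h1
      rw [pvCheck, if_neg (by omega), if_neg (by omega)]
      simp only [decide_eq_true_eq]
      have := hB i.toNat (by omega)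
      rwa [pvGetD_int _ _ (by omega), pvGetD_int _ _ (by omega),
           show (i + 1).toNat = i.toNat + 1 by omega]

-- ===== VERDICT (by name: the statement is the Claim_ definition above) =====
theorem checkIncreasingSkipIndex_spec : Claim_equal_checkIncreasingSkipIndex := by
  intro s k _
  exact pvMain s k
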